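-- pv_equiv track=rewrite | github.com/tim-mcdonnell/march_madness | src/pipeline/data_management.py | _extract_category_and_year
-- ===== SOURCE A (Python) =====
-- def _extract_category_and_year(filename: str) -> tuple[str | None, int | None]:
--     """
--     Extract category and year from a filename.
--
--     Args:
--         filename: Filename to parse
--
--     Returns:
--         Tuple containing:
--             - Category string or None if not found
--             - Year integer or None if not found
--     """
--     file_parts = filename.split('_')
--
--     if len(file_parts) < 3:
--         return None, None
--
--     # Reconstruct the category (might be multiple parts)
--     category_parts = []
--     file_year = None
--
--     for part in file_parts:
--         # Check if this part could be a year
--         if file_year is None and part.isdigit() and len(part) == 4: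
--             file_year = int(part)
--         elif file_year is None:
--             category_parts.append(part)
--
--     file_category = '_'.join(category_parts) if category_parts else None
--
--     return file_category, file_year
-- ===== SOURCE B (Python) =====
-- def _extract_category_and_year(filename: str) -> tuple:
--     # Character-level scan with str.partition: no token list is ever built and
--     # nothing is joined; the category is recovered as a prefix slice of filename.
--     if filename.count('_') < 2:
--         return None, None
--     rest = filename
--     while True:
--         token, sep, tail = rest.partition('_')
--         if len(token) == 4 and token.isdigit():
--             pre = len(filename) - len(rest)
--             return (filename[:pre - 1] if pre else None), int(token)
--         if not sep:
--             return filename, None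
--         rest = tail
-- ===== Notes on version B (the rewrite author's own statement) =====
-- stated objective: alternative
-- what changed: Replaces A's split-into-a-token-list plus accumulate-and-rejoin loop by a character-level str.partition scan that never builds a token list: it walks the string one partition step at a time and recovers the category as a prefix slice of the original filename.
import Mathlib
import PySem

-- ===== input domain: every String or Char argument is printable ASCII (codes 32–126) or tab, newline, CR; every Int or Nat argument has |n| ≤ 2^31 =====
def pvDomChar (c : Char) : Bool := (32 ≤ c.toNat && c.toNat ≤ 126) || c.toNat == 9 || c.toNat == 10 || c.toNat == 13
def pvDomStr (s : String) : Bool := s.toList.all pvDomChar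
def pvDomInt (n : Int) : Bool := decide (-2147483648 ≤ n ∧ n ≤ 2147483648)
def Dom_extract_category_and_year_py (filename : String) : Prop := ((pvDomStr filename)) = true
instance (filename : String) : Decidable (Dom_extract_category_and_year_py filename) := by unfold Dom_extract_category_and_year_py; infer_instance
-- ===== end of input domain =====

-- B replaces A's split-into-parts / accumulate-and-rejoin loop by a character-level
-- partition scan that never builds a token list and recovers the category as a prefix
-- slice of the original filename; objective: alternative (same cost, different machinery).

-- ===== PORT A =====
-- int(part) under the guard part.isdigit() and len(part)==4 never raises; .getD 0 is unreachable.
def extract_category_and_year_py (filename : String) : Option String × Option Int :=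
  let file_parts := (PySem.Str.split? filename "_").getD []   -- sep "_" is nonempty, split? is always some
  if file_parts.length < 3 then (none, none)
  else
    let st := file_parts.foldl
      (fun (acc : List String × Option Int) part =>
        match acc.2 with
        | none =>
          if PySem.Str.strIsdigit part && PySem.Str.len part == 4 then
            (acc.1, some ((PySem.Int.ofStr? part).getD 0))
          else
            (acc.1 ++ [part], none)
        | some _ => acc)
      ([], none)
    ((if st.1 ≠ [] then some (PySem.Str.join "_" st.1) else none), st.2)

-- ===== PORT B =====
-- Source B's while-loop body, one recursive step per iteration over the unscanned suffix.
-- str.partition('_') for the single-char separator is exactly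
-- (rest.takeWhile (≠ '_'), rest.dropWhile (≠ '_') empty ↔ sep == '', tail of the dropWhile);
-- filename[:pre-1] with pre ≥ 1 is List.take (pre-1); int(token) under the 4-digit guard
-- is (ofStr? token).getD 0 (the default is never used).
def pvScan (original : List Char) (rest : List Char) : Option String × Option Int :=
  let token := rest.takeWhile (fun c => c ≠ '_')
  if token.length == 4 && PySem.Chars.strIsdigit token then
    let pre := original.length - rest.length
    ((if pre ≠ 0 then some (String.ofList (original.take (pre - 1))) else none),
     some ((PySem.Int.ofStr? (String.ofList token)).getD 0))
  else
    let rest' := rest.dropWhile (fun c => c ≠ '_')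
    if _hr : rest' = [] then (some (String.ofList original), none)
    else pvScan original rest'.tail
termination_by rest.length
decreasing_by
  have h1 := (List.dropWhile_sublist (l := rest) (fun c => decide (c ≠ '_'))).length_le
  have h3 : 0 < (List.dropWhile (fun c => decide (c ≠ '_')) rest).length :=
    List.length_pos_iff.mpr _hr
  simp only [List.length_tail]
  omega

def extract_category_and_year_py_alt (filename : String) : Option String × Option Int :=
  if PySem.Str.count filename "_" < 2 then (none, none)
  else pvScan filename.toList filename.toList

-- ===== PRECONDITION & SPEC =====
def Spec_extract_category_and_year_py (filename : String) (out : Option String × Option Int) : Prop := out = extract_category_and_year_py_alt filename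
instance (filename : String) (out : Option String × Option Int) : Decidable (Spec_extract_category_and_year_py filename out) := by unfold Spec_extract_category_and_year_py; infer_instance

-- ===== CLAIM (what is proved, stated in full; the proofs are below) =====
def Claim_equal_extract_category_and_year_py : Prop := ∀ (filename : String), Dom_extract_category_and_year_py filename → Spec_extract_category_and_year_py filename (extract_category_and_year_py filename)

-- ===== LEMMAS AND PROOFS =====

-- the year test, on chars (B's operand order)
def pvIsYearC (t : List Char) : Bool := t.length == 4 && PySem.Chars.strIsdigit t

-- reference splitter: what splitting on the single character '_' produces
def pvSplit (pre : List Char) : List Char → List (List Char)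
  | [] => [pre]
  | c :: rest => if c = '_' then pre :: pvSplit [] rest else pvSplit (pre ++ [c]) rest

theorem pvCount_go_single (fuel : Nat) : ∀ (l : List Char) (acc : Nat), l.length ≤ fuel →
    PySem.Chars.count.go ['_'] fuel l acc = acc + l.count '_' := by
  induction fuel with
  | zero => intro l acc h
            rw [PySem.Chars.count.go.eq_def]
            cases l with
            | nil => simp
            | cons c t => simp at h
  | succ n ih =>
    intro l acc h
    rw [PySem.Chars.count.go.eq_def]
    cases l with
    | nil => simp
    | cons c t =>
      simp only [List.length_cons] at h
      simp only [List.isPrefixOf_cons₂, List.isPrefixOf_nil_left, Bool.and_true]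
      by_cases hc : '_' = c
      · subst hc
        simp only [beq_self_eq_true, if_true, List.length_cons, List.drop_succ_cons,
          List.length_nil, List.drop_zero]
        rw [ih t (acc + 1) (by omega)]
        simp
        omega
      · rw [if_neg (by simpa using hc)]
        rw [ih t acc (by omega)]
        have hc' : ¬(c = '_') := fun hh => hc hh.symm
        simp [hc']

theorem pvCount_single (cs : List Char) : PySem.Chars.count cs ['_'] = cs.count '_' := by
  rw [PySem.Chars.count]
  simp only [List.isEmpty_cons, if_false, Bool.false_eq_true]
  simpa using pvCount_go_single cs.length cs 0 (le_refl _)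

theorem pvSplit_go_single (fuel : Nat) : ∀ (l cur : List Char) (acc : List (List Char)),
    l.length ≤ fuel →
    PySem.Chars.splitOn.go ['_'] fuel l cur acc = acc.reverse ++ pvSplit cur.reverse l := by
  induction fuel with
  | zero => intro l cur acc h
            rw [PySem.Chars.splitOn.go.eq_def]
            cases l with
            | nil => simp [pvSplit]
            | cons c t => simp at h
  | succ n ih =>
    intro l cur acc h
    rw [PySem.Chars.splitOn.go.eq_def]
    cases l with
    | nil => simp [pvSplit]
    | cons c t =>
      simp only [List.length_cons] at h
      simp only [List.isPrefixOf_cons₂, List.isPrefixOf_nil_left, Bool.and_true]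
      by_cases hc : '_' = c
      · subst hc
        simp only [beq_self_eq_true, if_true, List.length_cons, List.drop_succ_cons,
          List.length_nil, List.drop_zero]
        rw [ih t [] (cur.reverse :: acc) (by omega)]
        simp [pvSplit]
      · rw [if_neg (by simpa using hc)]
        rw [ih t (c :: cur) acc (by omega)]
        simp [pvSplit, Ne.symm hc]

theorem pvSplitOn_single (cs : List Char) : PySem.Chars.splitOn cs ['_'] = pvSplit [] cs := by
  rw [PySem.Chars.splitOn]
  rw [pvSplit_go_single (cs.length + 1) cs [] [] (by omega)]
  simp

theorem pvSplit_ne_nil (l : List Char) : ∀ pre, pvSplit pre l ≠ [] := by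
  induction l with
  | nil => intro pre; simp [pvSplit]
  | cons c t ih => intro pre; by_cases hc : c = '_' <;> simp [pvSplit, hc, ih]

theorem pvSplit_length (l : List Char) : ∀ pre, (pvSplit pre l).length = l.count '_' + 1 := by
  induction l with
  | nil => intro pre; simp [pvSplit]
  | cons c t ih =>
    intro pre
    by_cases hc : c = '_' <;> simp [pvSplit, hc, ih]

theorem pvIntercalate_cons_of_ne_nil {xs : List (List Char)} (h : xs ≠ []) (a sep : List Char) :
    List.intercalate sep (a :: xs) = a ++ sep ++ List.intercalate sep xs := by
  obtain ⟨b, t, rfl⟩ := List.exists_cons_of_ne_nil h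
  simp [List.intercalate, List.intersperse]

theorem pvIntercalate_pvSplit (l : List Char) : ∀ pre,
    List.intercalate ['_'] (pvSplit pre l) = pre ++ l := by
  induction l with
  | nil => intro pre; simp [pvSplit, List.intercalate]
  | cons c t ih =>
    intro pre
    by_cases hc : c = '_'
    · subst hc
      simp only [pvSplit, if_true]
      rw [pvIntercalate_cons_of_ne_nil (pvSplit_ne_nil t []) pre ['_'], ih []]
      simp
    · simp only [pvSplit, hc, if_false]
      rw [ih (pre ++ [c])]
      simp

-- head/tail shape of pvSplit: first token, then a '_'-headed remainder
theorem pvSplit_eq (l : List Char) : ∀ pre,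
    pvSplit pre l = (pre ++ l.takeWhile (fun c => c ≠ '_')) ::
      (match l.dropWhile (fun c => c ≠ '_') with
       | [] => ([] : List (List Char))
       | _ :: t => pvSplit [] t) := by
  induction l with
  | nil => intro pre; simp [pvSplit]
  | cons c t ih =>
    intro pre
    by_cases hc : c = '_'
    · subst hc; simp [pvSplit]
    · simp only [pvSplit, hc, if_false]
      rw [ih (pre ++ [c])]
      simp [hc]

-- chars already scanned: the tokens so far, each followed by its '_'
def pvPre (done : List (List Char)) : List Char := (done.map (· ++ ['_'])).flatten

theorem pvPre_eq (done : List (List Char)) (h : done ≠ []) :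
    pvPre done = List.intercalate ['_'] done ++ ['_'] := by
  induction done with
  | nil => simp at h
  | cons d ds ih =>
    by_cases hds : ds = []
    · subst hds; simp [pvPre, List.intercalate]
    · rw [pvIntercalate_cons_of_ne_nil hds d ['_']]
      simp only [pvPre, List.map_cons, List.flatten_cons]
      rw [← pvPre, ih hds]
      simp

theorem pvPre_append (done : List (List Char)) (t : List Char) :
    pvPre (done ++ [t]) = pvPre done ++ t ++ ['_'] := by
  simp [pvPre]

-- B's scan, characterised against the reference splitter of the unscanned suffix
theorem pvScan_eq (n : Nat) : ∀ (rest : List Char) (done : List (List Char)),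
    rest.length ≤ n →
    (∀ t ∈ done, pvIsYearC t = false) →
    pvScan (pvPre done ++ rest) rest =
      (match (pvSplit [] rest).findIdx? pvIsYearC with
       | none => (some (String.ofList (pvPre done ++ rest)), none)
       | some j =>
          ((if done = [] ∧ j = 0 then none
            else some (String.ofList (List.intercalate ['_'] (done ++ (pvSplit [] rest).take j)))),
           some ((PySem.Int.ofStr? (String.ofList ((pvSplit [] rest).getD j []))).getD 0))) := by
  induction n with
  | zero =>
    intro rest done hlen hdone
    have hnil : rest = [] := by
      cases rest with
      | nil => rfl
      | cons c t => simp at hlen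
    subst hnil
    rw [pvScan]
    simp [pvSplit, pvIsYearC]
  | succ n ih =>
    intro rest done hlen hdone
    rw [pvScan]
    rw [pvSplit_eq rest []]
    simp only [List.nil_append, List.findIdx?_cons]
    by_cases hy : ((rest.takeWhile (fun c => c ≠ '_')).length == 4 &&
        PySem.Chars.strIsdigit (rest.takeWhile (fun c => c ≠ '_'))) = true
    · -- the head token is the year
      have hyC : pvIsYearC (rest.takeWhile (fun c => c ≠ '_')) = true := hy
      rw [if_pos hy]
      simp only [hyC, if_true]
      by_cases hd : done = []
      · subst hd
        simp [pvPre]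
      · have hpre : pvPre done = List.intercalate ['_'] done ++ ['_'] := pvPre_eq done hd
        have hprelen : ¬((pvPre done ++ rest).length - rest.length = 0) := by
          rw [hpre]; simp; omega
        rw [if_pos hprelen]
        rw [if_neg (fun hh => hd hh.1)]
        simp only [List.take_zero, List.append_nil, List.getD_cons_zero]
        rw [Prod.mk.injEq]
        refine ⟨?_, rfl⟩
        congr 2
        rw [show (pvPre done ++ rest).length - rest.length = (pvPre done).length by simp]
        rw [hpre]
        rw [show (List.intercalate ['_'] done ++ ['_']).length - 1 = (List.intercalate ['_'] done).length by simp]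
        rw [List.append_assoc, List.take_left]
    · -- the head token is not a year
      have hyC : pvIsYearC (rest.takeWhile (fun c => c ≠ '_')) = false := by
        simpa [pvIsYearC] using hy
      rw [if_neg hy]
      simp only [hyC, Bool.false_eq_true, if_false]
      cases hdrop : rest.dropWhile (fun c => c ≠ '_') with
      | nil =>
        rw [dif_pos rfl]
        simp
      | cons c tail =>
        have hc : c = '_' := by
          have hh := List.head_dropWhile_not (p := fun c => decide (c ≠ '_')) (l := rest)
          rw [hdrop] at hh
          simpa using hh (by simp)
        subst hc
        rw [dif_neg (by simp)]
        have hrest : rest = rest.takeWhile (fun c => c ≠ '_') ++ '_' :: tail := by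
          conv_lhs => rw [← List.takeWhile_append_dropWhile (p := fun c => decide (c ≠ '_')) (l := rest)]
          rw [hdrop]
        have htail_len : tail.length ≤ n := by
          have h1 : rest.length = (rest.takeWhile (fun c => c ≠ '_')).length + tail.length + 1 := by
            conv_lhs => rw [hrest]
            simp
            omega
          omega
        have hdone' : ∀ t ∈ done ++ [rest.takeWhile (fun c => c ≠ '_')], pvIsYearC t = false := by
          intro t ht
          rcases List.mem_append.mp ht with h | h
          · exact hdone t h
          · simp only [List.mem_singleton] at h; subst h; exact hyC
        have horig : pvPre (done ++ [rest.takeWhile (fun c => c ≠ '_')]) ++ tail = pvPre done ++ rest := by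
          rw [pvPre_append]
          conv_rhs => rw [hrest]
          simp
        have hIH := ih tail (done ++ [rest.takeWhile (fun c => c ≠ '_')]) htail_len hdone'
        rw [horig] at hIH
        simp only [List.tail_cons]
        rw [hIH]
        cases hfi : (pvSplit [] tail).findIdx? pvIsYearC with
        | none => simp
        | some j =>
          simp only [Option.map_some]
          rw [if_neg (by simp), if_neg (by omega)]
          rw [List.take_succ_cons]
          have hl : done ++ rest.takeWhile (fun c => c ≠ '_') :: (pvSplit [] tail).take j
               = (done ++ [rest.takeWhile (fun c => c ≠ '_')]) ++ (pvSplit [] tail).take j := by simp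
          rw [hl]
          rfl

-- A's loop body, named for the lemmas
def pvStepA (acc : List String × Option Int) (part : String) : List String × Option Int :=
  match acc.2 with
  | none =>
    if PySem.Str.strIsdigit part && PySem.Str.len part == 4 then
      (acc.1, some ((PySem.Int.ofStr? part).getD 0))
    else (acc.1 ++ [part], none)
  | some _ => acc

-- the string-level year test, in A's operand order; equal to pvIsYearC on ofList
def pvIsYearS (s : String) : Bool := PySem.Str.strIsdigit s && PySem.Str.len s == 4

theorem pvStepA_none (cs : List String) (p : String) :
    pvStepA (cs, none) p =
      if pvIsYearS p then (cs, some ((PySem.Int.ofStr? p).getD 0)) else (cs ++ [p], none) := rfl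

theorem pvIsYearS_ofList (t : List Char) : pvIsYearS (String.ofList t) = pvIsYearC t := by
  simp only [pvIsYearS, pvIsYearC, PySem.Str.strIsdigit_eq, PySem.Str.len_eq, String.toList_ofList]
  rw [Bool.and_comm]
  congr 1
  by_cases h : t.length = 4
  · simp [h]
  · have h2 : (((t.length : Int)) == 4) = false := by
      simp only [beq_eq_false_iff_ne, ne_eq]
      omega
    have h3 : (t.length == 4) = false := by simp [h]
    rw [h2, h3]

-- once the year is found, A's loop keeps the state unchanged
theorem pvFoldA_some (parts : List String) (cs : List String) (y : Int) :
    parts.foldl pvStepA (cs, some y) = (cs, some y) := by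
  induction parts with
  | nil => rfl
  | cons p ps ih => simpa [pvStepA] using ih

-- A's loop computes the first year and the prefix of non-year parts before it
theorem pvFoldA_char (parts : List String) (cs : List String) :
    parts.foldl pvStepA (cs, none) =
      match parts.findIdx? pvIsYearS with
      | none => (cs ++ parts, none)
      | some idx => (cs ++ parts.take idx, some ((PySem.Int.ofStr? (parts.getD idx "")).getD 0)) := by
  induction parts generalizing cs with
  | nil => simp
  | cons p ps ih =>
    rw [List.foldl_cons, pvStepA_none]
    by_cases hp : pvIsYearS p
    · rw [if_pos hp]
      rw [List.findIdx?_cons, if_pos hp, pvFoldA_some]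
      simp
    · rw [if_neg hp]
      rw [ih (cs ++ [p])]
      rw [List.findIdx?_cons, if_neg (by simpa using hp)]
      cases h : List.findIdx? pvIsYearS ps with
      | none => simp
      | some i => simp

-- the parts A folds over are String.ofList of the reference splitter's tokens
theorem pvParts_eq (filename : String) :
    (PySem.Str.split? filename "_").getD [] = (pvSplit [] filename.toList).map String.ofList := by
  have h := PySem.Str.split?_map filename "_"
  rw [PySem.Chars.split?] at h
  simp only [show ("_" : String).toList = ['_'] from rfl] at h
  rw [pvSplitOn_single] at h
  cases hs : PySem.Str.split? filename "_" with
  | none => rw [hs] at h; simp at h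
  | some parts =>
    rw [hs] at h
    simp only [Option.map_some, Option.some.injEq, List.isEmpty_cons, if_false,
      Bool.false_eq_true] at h
    simp only [Option.getD_some]
    rw [← h, List.map_map]
    simp [Function.comp_def, String.ofList_toList]

-- Str.join over ofList tokens is ofList of the intercalation
theorem pvJoin_ofList (P : List (List Char)) :
    PySem.Str.join "_" (P.map String.ofList) = String.ofList (List.intercalate ['_'] P) := by
  rw [PySem.Str.join]
  congr 1
  simp only [List.map_map]
  rw [show ("_" : String).toList = ['_'] from rfl]
  rw [PySem.Chars.join]
  congr 1
  simp [Function.comp_def, String.toList_ofList]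

-- ===== VERDICT (by name: the statement is the Claim_ definition above) =====
theorem extract_category_and_year_py_spec : Claim_equal_extract_category_and_year_py := by
  intro filename _
  unfold Spec_extract_category_and_year_py extract_category_and_year_py extract_category_and_year_py_alt
  have hcnt : PySem.Str.count filename "_" = filename.toList.count '_' := by
    rw [PySem.Str.count_eq]
    rw [show ("_" : String).toList = ['_'] from rfl]
    exact pvCount_single filename.toList
  have hparts : (PySem.Str.split? filename "_").getD [] =
      (pvSplit [] filename.toList).map String.ofList := pvParts_eq filename
  set P := pvSplit [] filename.toList with hP
  have hlenP : P.length = filename.toList.count '_' + 1 := pvSplit_length filename.toList []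
  by_cases hlt : filename.toList.count '_' < 2
  · rw [if_pos (by rw [hparts]; simp [hlenP]; omega)]
    rw [if_pos (by rw [hcnt]; exact hlt)]
  · rw [if_neg (by rw [hparts]; simp [hlenP]; omega)]
    rw [if_neg (by rw [hcnt]; exact hlt)]
    -- A's side: the fold, characterised
    show (fun st => ((if st.1 ≠ [] then some (PySem.Str.join "_" st.1) else none), st.2))
          (((PySem.Str.split? filename "_").getD []).foldl pvStepA ([], none)) = _
    rw [hparts, pvFoldA_char]
    -- B's side: the scan, characterised (done = [])
    have hB := pvScan_eq filename.toList.length filename.toList [] (le_refl _) (by simp)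
    simp only [pvPre, List.map_nil, List.flatten_nil, List.nil_append] at hB
    rw [hB, ← hP]
    -- the two predicates coincide under the map
    have hfx : (pvIsYearS ∘ String.ofList) = pvIsYearC := by
      funext t; exact pvIsYearS_ofList t
    rw [List.findIdx?_map, hfx]
    cases hfi : P.findIdx? pvIsYearC with
    | none =>
      have hne : P.map String.ofList ≠ [] := by
        intro h
        exact pvSplit_ne_nil filename.toList [] (by simpa using h)
      simp only [List.nil_append]
      rw [if_pos (by simpa using hne)]
      rw [pvJoin_ofList]
      rw [show List.intercalate ['_'] P = [] ++ filename.toList from pvIntercalate_pvSplit filename.toList []]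
      simp
    | some idx =>
      have hidx : idx < P.length := (List.findIdx?_eq_some_iff_findIdx_eq.mp hfi).1
      simp only [List.nil_append]
      rw [Prod.mk.injEq]
      refine ⟨?_, ?_⟩
      · -- the category component
        rw [← List.map_take]
        by_cases hz : idx = 0
        · subst hz
          simp
        · have hPne : P ≠ [] := pvSplit_ne_nil filename.toList []
          have htk : (P.take idx).map String.ofList ≠ [] := by
            simp [List.take_eq_nil_iff, hz, hPne]
          rw [if_pos htk, if_neg (by simp [hz])]
          rw [pvJoin_ofList]
      · -- the year component
        have hget : (P.map String.ofList).getD idx "" = String.ofList (P.getD idx []) := by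
          rw [List.getD_eq_getElem?_getD, List.getD_eq_getElem?_getD, List.getElem?_map]
          rw [List.getElem?_eq_getElem hidx]
          rfl
        rw [hget]
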